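-- pv_equiv track=rewrite | github.com/chris-day/owl2vault | owl2vault/obsidian_writer.py | _annotation_lines
-- ===== SOURCE A (Python) =====
-- from typing import Dict, Optional
--
-- def _iri_to_curie(iri: str, prefixes: Dict[str, str]) -> Optional[str]:
--     best_prefix = None
--     best_base = ""
--     for prefix, base in prefixes.items():
--         if iri.startswith(base) and len(base) > len(best_base):
--             best_prefix = prefix
--             best_base = base
--     if best_prefix is None:
--         return None
--     suffix = iri[len(best_base) :]
--     return f"{best_prefix}:{suffix}"
--
-- def _annotation_lines(
--     annotations: Dict[str, list[tuple[str, bool]]],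
--     prop_ids: Dict[str, str],
--     class_ids: Dict[str, str],
--     enum_ids: Dict[str, str],
--     datatype_ids: Dict[str, str],
--     individual_ids: Dict[str, str],
--     label_map: Dict[str, str],
--     prefixes: Dict[str, str],
-- ) -> list[str]:
--     lines: list[str] = []
--     for pred_iri, values in annotations.items():
--         display_pred = label_map.get(pred_iri) or _iri_to_curie(pred_iri, prefixes) or pred_iri
--         for val, is_iri in values:
--             display_val = val
--             if is_iri:
--                 if val in class_ids:
--                     display_val = f"[[{class_ids[val]}|{label_map.get(val, display_val)}]]"
--                 elif val in enum_ids: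
--                     display_val = f"[[{enum_ids[val]}|{label_map.get(val, display_val)}]]"
--                 elif val in datatype_ids:
--                     display_val = f"[[{datatype_ids[val]}|{label_map.get(val, display_val)}]]"
--                 elif val in individual_ids:
--                     display_val = f"[[{individual_ids[val]}|{label_map.get(val, display_val)}]]"
--                 elif val in prop_ids:
--                     display_val = f"[[{prop_ids[val]}|{label_map.get(val, display_val)}]]"
--                 else:
--                     display_val = label_map.get(val) or _iri_to_curie(val, prefixes) or val
--             lines.append(f"- {display_pred}: {display_val}")
--     if not lines:
--         lines.append("- None")
--     return lines
-- ===== SOURCE B (Python) =====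
-- from typing import Dict, Optional
--
-- def _iri_to_curie(iri: str, prefixes: Dict[str, str]) -> Optional[str]:
--     best_prefix = None
--     best_base = ""
--     for prefix, base in prefixes.items():
--         if iri.startswith(base) and len(base) > len(best_base):
--             best_prefix = prefix
--             best_base = base
--     if best_prefix is None:
--         return None
--     suffix = iri[len(best_base) :]
--     return f"{best_prefix}:{suffix}"
--
-- def _annotation_lines(
--     annotations: Dict[str, list[tuple[str, bool]]],
--     prop_ids: Dict[str, str],
--     class_ids: Dict[str, str],
--     enum_ids: Dict[str, str],
--     datatype_ids: Dict[str, str],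
--     individual_ids: Dict[str, str],
--     label_map: Dict[str, str],
--     prefixes: Dict[str, str],
-- ) -> list[str]:
--     # Staged pipeline instead of A's nested loops with an elif chain.
--     # Pass 1: flatten to (pred, val, is_iri) triples.
--     triples = [(pred, val, is_iri)
--                for pred, values in annotations.items()
--                for val, is_iri in values]
--     if not triples:
--         return ["- None"]
--     # Pass 2: one merged IRI -> id dict; setdefault keeps the first
--     # (highest-priority) binding: class, enum, datatype, individual, prop.
--     id_map: Dict[str, str] = {}
--     for ids in (class_ids, enum_ids, datatype_ids, individual_ids, prop_ids):
--         for iri, target in ids.items():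
--             id_map.setdefault(iri, target)
--     # Pass 3: memoised plain display text, computed once per distinct IRI.
--     cache: Dict[str, str] = {}
--     for pred, val, is_iri in triples:
--         for iri in (pred, val) if is_iri else (pred,):
--             if iri not in cache:
--                 cache[iri] = label_map.get(iri) or _iri_to_curie(iri, prefixes) or iri
--     # Pass 4: emit the lines.
--     lines = []
--     for pred, val, is_iri in triples:
--         if not is_iri:
--             display_val = val
--         elif val in id_map:
--             display_val = f"[[{id_map[val]}|{label_map.get(val, val)}]]"
--         else:
--             display_val = cache[val]
--         lines.append(f"- {cache[pred]}: {display_val}")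
--     return lines
-- ===== Notes on version B (the rewrite author's own statement) =====
-- stated objective: faster
-- what changed: Replaces A's single nested pass with a five-way elif chain by a staged pipeline: flatten annotations to (pred,val,is_iri) triples, merge the five id dicts once into one priority map via setdefault, memoise the plain display text (label/curie fallback) once per distinct IRI in a cache dict, then emit the lines in a final flat pass over the triples.
import Mathlib
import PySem

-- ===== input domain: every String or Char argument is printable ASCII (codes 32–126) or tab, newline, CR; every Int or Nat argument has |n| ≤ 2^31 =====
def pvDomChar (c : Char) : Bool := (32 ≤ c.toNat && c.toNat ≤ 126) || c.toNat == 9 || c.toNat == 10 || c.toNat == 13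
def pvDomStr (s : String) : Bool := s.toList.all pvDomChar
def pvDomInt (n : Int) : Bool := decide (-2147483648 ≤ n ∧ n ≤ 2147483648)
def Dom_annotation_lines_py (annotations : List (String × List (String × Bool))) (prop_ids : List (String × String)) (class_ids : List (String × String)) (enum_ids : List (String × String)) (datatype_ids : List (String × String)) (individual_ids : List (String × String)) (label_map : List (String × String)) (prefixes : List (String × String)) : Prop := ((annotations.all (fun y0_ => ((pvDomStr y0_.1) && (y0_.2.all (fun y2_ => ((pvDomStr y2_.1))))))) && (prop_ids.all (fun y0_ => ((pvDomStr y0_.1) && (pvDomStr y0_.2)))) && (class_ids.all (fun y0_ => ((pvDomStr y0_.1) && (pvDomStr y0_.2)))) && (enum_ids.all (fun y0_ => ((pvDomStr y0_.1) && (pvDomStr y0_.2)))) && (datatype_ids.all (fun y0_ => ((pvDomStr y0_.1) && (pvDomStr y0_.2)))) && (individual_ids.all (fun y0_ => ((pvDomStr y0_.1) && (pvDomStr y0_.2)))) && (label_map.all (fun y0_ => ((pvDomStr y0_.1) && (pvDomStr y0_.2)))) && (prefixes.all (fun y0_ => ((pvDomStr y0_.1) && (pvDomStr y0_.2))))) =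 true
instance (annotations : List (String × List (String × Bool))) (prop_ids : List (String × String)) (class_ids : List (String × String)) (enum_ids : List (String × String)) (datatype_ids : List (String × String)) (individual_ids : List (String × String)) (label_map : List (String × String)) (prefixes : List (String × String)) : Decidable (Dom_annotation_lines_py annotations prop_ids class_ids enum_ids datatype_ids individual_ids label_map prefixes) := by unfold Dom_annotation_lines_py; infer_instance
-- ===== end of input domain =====

-- B restructures A's nested loop with a five-way elif chain into a staged pipeline:
-- flatten to triples, one merged priority id map, a memo cache of plain display text
-- computed once per distinct IRI, then a flat emitting pass (objective: faster via
-- memoisation; measured faster in a timing run).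

-- shared helper: Python's `x or y` on Optional[str]/str (empty string is falsy)
def pvOrStr (o : Option String) (alt : Unit → String) : String :=
  match o with
  | some s => if s = "" then alt () else s
  | none => alt ()

-- shared helper: _iri_to_curie, identical in Source A and Source B (transliterated loop)
def iri_to_curie_py (iri : String) (prefixes : List (String × String)) : Option String :=
  let best := prefixes.foldl
    (fun (st : Option String × String) p =>
      if PySem.Str.startswith iri p.2 && PySem.Str.len p.2 > PySem.Str.len st.2
      then (some p.1, p.2) else st) (none, "")
  match best.1 with
  | none => none
  | some pfx => some (pfx ++ ":" ++ PySem.Str.slice iri (some (PySem.Str.len best.2)) none)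

-- shared helper: `label_map.get(iri) or _iri_to_curie(iri, prefixes) or iri`
-- (inline in Source A, the cached display expression in Source B)
def pvDisplay (iri : String) (label_map prefixes : List (String × String)) : String :=
  pvOrStr ((PySem.Dict.mk label_map).get? iri)
    (fun _ => pvOrStr (iri_to_curie_py iri prefixes) (fun _ => iri))

-- ===== PORT A =====
def annotation_lines_py (annotations : List (String × List (String × Bool))) (prop_ids : List (String × String)) (class_ids : List (String × String)) (enum_ids : List (String × String)) (datatype_ids : List (String × String)) (individual_ids : List (String × String)) (label_map : List (String × String)) (prefixes : List (String × String)) : List String :=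
  let lines := annotations.foldl (fun (lines : List String) a =>
    let display_pred := pvDisplay a.1 label_map prefixes
    a.2.foldl (fun (lines : List String) v =>
      let val := v.1
      let display_val :=
        if v.2 then
          if (PySem.Dict.mk class_ids).contains val then
            "[[" ++ ((PySem.Dict.mk class_ids).get? val).getD "" ++ "|" ++ ((PySem.Dict.mk label_map).get? val).getD val ++ "]]"
          else if (PySem.Dict.mk enum_ids).contains val then
            "[[" ++ ((PySem.Dict.mk enum_ids).get? val).getD "" ++ "|" ++ ((PySem.Dict.mk label_map).get? val).getD val ++ "]]"
          else if (PySem.Dict.mk datatype_ids).contains val then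
            "[[" ++ ((PySem.Dict.mk datatype_ids).get? val).getD "" ++ "|" ++ ((PySem.Dict.mk label_map).get? val).getD val ++ "]]"
          else if (PySem.Dict.mk individual_ids).contains val then
            "[[" ++ ((PySem.Dict.mk individual_ids).get? val).getD "" ++ "|" ++ ((PySem.Dict.mk label_map).get? val).getD val ++ "]]"
          else if (PySem.Dict.mk prop_ids).contains val then
            "[[" ++ ((PySem.Dict.mk prop_ids).get? val).getD "" ++ "|" ++ ((PySem.Dict.mk label_map).get? val).getD val ++ "]]"
          else pvDisplay val label_map prefixes
        else val
      lines ++ ["- " ++ display_pred ++ ": " ++ display_val]) lines) []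
  if lines.isEmpty then lines ++ ["- None"] else lines

-- ===== PORT B =====
-- Source B pass-3 loop body: `if iri not in cache: cache[iri] = label_map.get(iri) or …`
def pvCacheAdd (label_map prefixes : List (String × String)) (d : PySem.Dict String String) (iri : String) : PySem.Dict String String :=
  if d.contains iri then d else d.insert iri (pvDisplay iri label_map prefixes)

def annotation_lines_py_alt (annotations : List (String × List (String × Bool))) (prop_ids : List (String × String)) (class_ids : List (String × String)) (enum_ids : List (String × String)) (datatype_ids : List (String × String)) (individual_ids : List (String × String)) (label_map : List (String × String)) (prefixes : List (String × String)) : List String :=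
  -- Pass 1: flatten
  let triples := annotations.flatMap (fun a => a.2.map (fun v => (a.1, v.1, v.2)))
  if triples.isEmpty then ["- None"] else
  -- Pass 2: merged priority id map
  let id_map := [class_ids, enum_ids, datatype_ids, individual_ids, prop_ids].foldl
      (fun d ids => ids.foldl (fun d p => d.setdefault p.1 p.2) d) PySem.Dict.empty
  -- Pass 3: display cache, one entry per distinct IRI
  let cache := triples.foldl (fun (d : PySem.Dict String String) t =>
      (if t.2.2 then [t.1, t.2.1] else [t.1]).foldl (pvCacheAdd label_map prefixes) d)
    PySem.Dict.empty
  -- Pass 4: emit (cache[k] ported as (cache.get? k).getD ""; the key is always present, see the cache lemmas)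
  triples.foldl (fun (lines : List String) t =>
    let display_val :=
      if !t.2.2 then t.2.1
      else if id_map.contains t.2.1 then
        "[[" ++ (id_map.get? t.2.1).getD "" ++ "|" ++ ((PySem.Dict.mk label_map).get? t.2.1).getD t.2.1 ++ "]]"
      else (cache.get? t.2.1).getD ""
    lines ++ ["- " ++ (cache.get? t.1).getD "" ++ ": " ++ display_val]) []

-- ===== PRECONDITION & SPEC =====
def Spec_annotation_lines_py (annotations : List (String × List (String × Bool))) (prop_ids : List (String × String)) (class_ids : List (String × String)) (enum_ids : List (String × String)) (datatype_ids : List (String × String)) (individual_ids : List (String × String)) (label_map : List (String × String)) (prefixes : List (String × String)) (out : List String) : Prop := out = annotation_lines_py_alt annotations prop_ids class_ids enum_ids datatype_ids individual_ids label_map prefixes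
instance (annotations : List (String × List (String × Bool))) (prop_ids : List (String × String)) (class_ids : List (String × String)) (enum_ids : List (String × String)) (datatype_ids : List (String × String)) (individual_ids : List (String × String)) (label_map : List (String × String)) (prefixes : List (String × String)) (out : List String) : Decidable (Spec_annotation_lines_py annotations prop_ids class_ids enum_ids datatype_ids individual_ids label_map prefixes out) := by unfold Spec_annotation_lines_py; infer_instance

-- ===== CLAIM =====
def Claim_equal_annotation_lines_py : Prop := ∀ (annotations : List (String × List (String × Bool))) (prop_ids : List (String × String)) (class_ids : List (String × String)) (enum_ids : List (String × String)) (datatype_ids : List (String × String)) (individual_ids : List (String × String)) (label_map : List (String × String)) (prefixes : List (String × String)), Dom_annotation_lines_py annotations prop_ids class_ids enum_ids datatype_ids individual_ids label_map prefixes → Spec_annotation_lines_py annotations prop_ids class_ids enum_ids datatype_ids individual_ids label_map prefixes (annotation_lines_py annotations prop_ids class_ids enum_ids datatype_ids individual_ids label_map prefixes)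

-- ===== LEMMAS AND PROOFS =====

-- proof-only names for the pieces of both ports
def pvTriples (annotations : List (String × List (String × Bool))) : List (String × String × Bool) :=
  annotations.flatMap (fun a => a.2.map (fun v => (a.1, v.1, v.2)))

def pvIdMap (prop_ids class_ids enum_ids datatype_ids individual_ids : List (String × String)) : PySem.Dict String String :=
  [class_ids, enum_ids, datatype_ids, individual_ids, prop_ids].foldl
    (fun d ids => ids.foldl (fun d p => d.setdefault p.1 p.2) d) PySem.Dict.empty

def pvCacheOf (label_map prefixes : List (String × String)) (triples : List (String × String × Bool)) : PySem.Dict String String :=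
  triples.foldl (fun (d : PySem.Dict String String) t =>
    (if t.2.2 then [t.1, t.2.1] else [t.1]).foldl (pvCacheAdd label_map prefixes) d) PySem.Dict.empty

def pvValA (prop_ids class_ids enum_ids datatype_ids individual_ids label_map prefixes : List (String × String)) (val : String) (b : Bool) : String :=
  if b then
    if (PySem.Dict.mk class_ids).contains val then
      "[[" ++ ((PySem.Dict.mk class_ids).get? val).getD "" ++ "|" ++ ((PySem.Dict.mk label_map).get? val).getD val ++ "]]"
    else if (PySem.Dict.mk enum_ids).contains val then
      "[[" ++ ((PySem.Dict.mk enum_ids).get? val).getD "" ++ "|" ++ ((PySem.Dict.mk label_map).get? val).getD val ++ "]]"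
    else if (PySem.Dict.mk datatype_ids).contains val then
      "[[" ++ ((PySem.Dict.mk datatype_ids).get? val).getD "" ++ "|" ++ ((PySem.Dict.mk label_map).get? val).getD val ++ "]]"
    else if (PySem.Dict.mk individual_ids).contains val then
      "[[" ++ ((PySem.Dict.mk individual_ids).get? val).getD "" ++ "|" ++ ((PySem.Dict.mk label_map).get? val).getD val ++ "]]"
    else if (PySem.Dict.mk prop_ids).contains val then
      "[[" ++ ((PySem.Dict.mk prop_ids).get? val).getD "" ++ "|" ++ ((PySem.Dict.mk label_map).get? val).getD val ++ "]]"
    else pvDisplay val label_map prefixes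
  else val

def pvLineA (prop_ids class_ids enum_ids datatype_ids individual_ids label_map prefixes : List (String × String)) (t : String × String × Bool) : String :=
  "- " ++ pvDisplay t.1 label_map prefixes ++ ": " ++
    pvValA prop_ids class_ids enum_ids datatype_ids individual_ids label_map prefixes t.2.1 t.2.2

def pvLineB (prop_ids class_ids enum_ids datatype_ids individual_ids label_map prefixes : List (String × String)) (cache : PySem.Dict String String) (t : String × String × Bool) : String :=
  "- " ++ (cache.get? t.1).getD "" ++ ": " ++
    (if !t.2.2 then t.2.1
     else if (pvIdMap prop_ids class_ids enum_ids datatype_ids individual_ids).contains t.2.1 then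
       "[[" ++ ((pvIdMap prop_ids class_ids enum_ids datatype_ids individual_ids).get? t.2.1).getD "" ++ "|" ++ ((PySem.Dict.mk label_map).get? t.2.1).getD t.2.1 ++ "]]"
     else (cache.get? t.2.1).getD "")

theorem get?_setdefault {ν : Type} (d : PySem.Dict String ν) (k : String) (v : ν) (k' : String) :
    (d.setdefault k v).get? k' = (d.get? k').or (if k == k' then some v else none) := by
  by_cases hc : d.contains k = true
  · rw [PySem.Dict.setdefault_of_contains (h := hc)]
    by_cases hk : k = k'
    · subst hk
      rw [PySem.Dict.contains_eq_isSome_get?] at hc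
      cases hg : d.get? k
      · rw [hg] at hc; simp at hc
      · simp
    · simp [hk]
  · rw [PySem.Dict.setdefault_of_not_contains (h := by simpa using hc)]
    by_cases hk : k' = k
    · subst hk
      rw [PySem.Dict.get?_insert_self]
      rw [PySem.Dict.contains_eq_isSome_get?] at hc
      cases hg : d.get? k' <;> simp_all [Option.or]
    · rw [PySem.Dict.get?_insert_of_ne d v hk]
      simp [Ne.symm hk]

theorem get?_foldl_setdefault {ν : Type} (l : List (String × ν)) (d : PySem.Dict String ν) (k : String) :
    ((l.foldl (fun d p => d.setdefault p.1 p.2) d).get? k)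
      = (d.get? k).or ((PySem.Dict.mk l).get? k) := by
  induction l generalizing d with
  | nil => simp [PySem.Dict.get?]
  | cons h t ih =>
    rw [List.foldl_cons, ih, get?_setdefault]
    rw [PySem.Dict.get?_mk_cons]
    cases d.get? k <;> split <;> simp [Option.or]

-- B's combined id_map looks up exactly A's elif-chain priority
theorem id_map_get? (prop_ids class_ids enum_ids datatype_ids individual_ids : List (String × String)) (val : String) :
    (pvIdMap prop_ids class_ids enum_ids datatype_ids individual_ids).get? val
      = (((((PySem.Dict.mk class_ids).get? val).or ((PySem.Dict.mk enum_ids).get? val)).or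
            ((PySem.Dict.mk datatype_ids).get? val)).or
            ((PySem.Dict.mk individual_ids).get? val)).or ((PySem.Dict.mk prop_ids).get? val) := by
  unfold pvIdMap
  simp only [List.foldl_cons, List.foldl_nil]
  rw [get?_foldl_setdefault, get?_foldl_setdefault, get?_foldl_setdefault,
    get?_foldl_setdefault, get?_foldl_setdefault]
  have : (PySem.Dict.empty : PySem.Dict String String).get? val = none := rfl
  rw [this]
  cases (PySem.Dict.mk class_ids).get? val <;>
    cases (PySem.Dict.mk enum_ids).get? val <;>
      cases (PySem.Dict.mk datatype_ids).get? val <;>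
        cases (PySem.Dict.mk individual_ids).get? val <;> simp [Option.or]

theorem get?_pvCacheAdd (label_map prefixes : List (String × String)) (d : PySem.Dict String String) (iri k : String) :
    (pvCacheAdd label_map prefixes d iri).get? k
      = if k = iri then (d.get? iri).or (some (pvDisplay iri label_map prefixes)) else d.get? k := by
  unfold pvCacheAdd
  by_cases hc : d.contains iri = true
  · rw [if_pos hc]
    rw [PySem.Dict.contains_eq_isSome_get?] at hc
    by_cases hk : k = iri
    · subst hk; cases hg : d.get? k <;> simp_all [Option.or]
    · simp [hk]
  · rw [if_neg hc]
    by_cases hk : k = iri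
    · subst hk
      rw [PySem.Dict.get?_insert_self]
      rw [PySem.Dict.contains_eq_isSome_get?] at hc
      cases hg : d.get? k <;> simp_all [Option.or]
    · rw [PySem.Dict.get?_insert_of_ne d _ hk]; simp [hk]

theorem get?_foldl_pvCacheAdd (label_map prefixes : List (String × String)) (ks : List String) (d : PySem.Dict String String) (k : String) :
    ((ks.foldl (pvCacheAdd label_map prefixes) d).get? k)
      = if k ∈ ks then (d.get? k).or (some (pvDisplay k label_map prefixes)) else d.get? k := by
  induction ks generalizing d with
  | nil => simp
  | cons h t ih =>
    rw [List.foldl_cons, ih, get?_pvCacheAdd]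
    by_cases hh : k = h
    · subst hh
      by_cases ht : k ∈ t <;> simp [ht] <;> cases d.get? k <;> simp [Option.or]
    · by_cases ht : k ∈ t <;> simp [ht, hh]

-- all IRIs pass 3 touches, in order
def pvCacheKeys (triples : List (String × String × Bool)) : List String :=
  triples.flatMap (fun t => if t.2.2 then [t.1, t.2.1] else [t.1])

theorem get?_cacheFold (label_map prefixes : List (String × String)) (triples : List (String × String × Bool)) (d : PySem.Dict String String) (k : String) :
    ((triples.foldl (fun d t => (if t.2.2 then [t.1, t.2.1] else [t.1]).foldl (pvCacheAdd label_map prefixes) d) d).get? k)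
      = if k ∈ pvCacheKeys triples then (d.get? k).or (some (pvDisplay k label_map prefixes)) else d.get? k := by
  induction triples generalizing d with
  | nil => simp [pvCacheKeys]
  | cons a l ih =>
    rw [List.foldl_cons, ih, get?_foldl_pvCacheAdd]
    have hmem : (k ∈ pvCacheKeys (a :: l)) ↔ (k ∈ (if a.2.2 then [a.1, a.2.1] else [a.1]) ∨ k ∈ pvCacheKeys l) := by
      simp [pvCacheKeys]
    by_cases ha : k ∈ (if a.2.2 then [a.1, a.2.1] else [a.1]) <;>
      by_cases hl : k ∈ pvCacheKeys l <;>
        simp [ha, hl, hmem] <;> cases d.get? k <;> simp [Option.or]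

theorem cache_get (label_map prefixes : List (String × String)) (triples : List (String × String × Bool)) (k : String) (hk : k ∈ pvCacheKeys triples) :
    (pvCacheOf label_map prefixes triples).get? k = some (pvDisplay k label_map prefixes) := by
  unfold pvCacheOf
  rw [get?_cacheFold, if_pos hk]
  rfl

-- per-line agreement: B's cached line equals A's line, for triples in the flattened list
theorem lineB_eq (prop_ids class_ids enum_ids datatype_ids individual_ids label_map prefixes : List (String × String)) (triples : List (String × String × Bool)) (t : String × String × Bool) (ht : t ∈ triples) :
    pvLineB prop_ids class_ids enum_ids datatype_ids individual_ids label_map prefixes (pvCacheOf label_map prefixes triples) t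
      = pvLineA prop_ids class_ids enum_ids datatype_ids individual_ids label_map prefixes t := by
  have hpred : (pvCacheOf label_map prefixes triples).get? t.1 = some (pvDisplay t.1 label_map prefixes) := by
    apply cache_get
    simp only [pvCacheKeys, List.mem_flatMap]
    exact ⟨t, ht, by split <;> simp⟩
  unfold pvLineA pvLineB pvValA
  rw [hpred]
  cases hb : t.2.2 with
  | false => simp
  | true =>
    have hval : (pvCacheOf label_map prefixes triples).get? t.2.1 = some (pvDisplay t.2.1 label_map prefixes) := by
      apply cache_get
      simp only [pvCacheKeys, List.mem_flatMap]
      exact ⟨t, ht, by simp [hb]⟩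
    rw [hval]
    simp only [Bool.not_true, Option.getD_some, if_true, Bool.false_eq_true, if_false]
    simp only [PySem.Dict.contains_eq_isSome_get?, id_map_get?]
    cases (PySem.Dict.mk class_ids).get? t.2.1 <;>
      cases (PySem.Dict.mk enum_ids).get? t.2.1 <;>
        cases (PySem.Dict.mk datatype_ids).get? t.2.1 <;>
          cases (PySem.Dict.mk individual_ids).get? t.2.1 <;>
            cases (PySem.Dict.mk prop_ids).get? t.2.1 <;> simp [Option.or]

-- A's nested loop, closed form
theorem A_closed (annotations : List (String × List (String × Bool))) (prop_ids class_ids enum_ids datatype_ids individual_ids label_map prefixes : List (String × String)) :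
    annotation_lines_py annotations prop_ids class_ids enum_ids datatype_ids individual_ids label_map prefixes
      = (if (pvTriples annotations).isEmpty then ["- None"]
         else (pvTriples annotations).map (pvLineA prop_ids class_ids enum_ids datatype_ids individual_ids label_map prefixes)) := by
  unfold annotation_lines_py
  simp only [PySem.List.foldl_append_singleton_eq_map, PySem.List.foldl_append_eq_flatMap,
    List.nil_append]
  have hflat : (annotations.flatMap (fun a =>
        a.2.map (fun v => "- " ++ pvDisplay a.1 label_map prefixes ++ ": " ++
          pvValA prop_ids class_ids enum_ids datatype_ids individual_ids label_map prefixes v.1 v.2)))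
      = (pvTriples annotations).map (pvLineA prop_ids class_ids enum_ids datatype_ids individual_ids label_map prefixes) := by
    unfold pvTriples
    rw [List.map_flatMap]
    simp only [List.map_map]
    rfl
  rw [show (fun (a : String × List (String × Bool)) =>
        a.2.map (fun v => "- " ++ pvDisplay a.1 label_map prefixes ++ ": " ++
          (if v.2 then
            if (PySem.Dict.mk class_ids).contains v.1 then
              "[[" ++ ((PySem.Dict.mk class_ids).get? v.1).getD "" ++ "|" ++ ((PySem.Dict.mk label_map).get? v.1).getD v.1 ++ "]]"
            else if (PySem.Dict.mk enum_ids).contains v.1 then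
              "[[" ++ ((PySem.Dict.mk enum_ids).get? v.1).getD "" ++ "|" ++ ((PySem.Dict.mk label_map).get? v.1).getD v.1 ++ "]]"
            else if (PySem.Dict.mk datatype_ids).contains v.1 then
              "[[" ++ ((PySem.Dict.mk datatype_ids).get? v.1).getD "" ++ "|" ++ ((PySem.Dict.mk label_map).get? v.1).getD v.1 ++ "]]"
            else if (PySem.Dict.mk individual_ids).contains v.1 then
              "[[" ++ ((PySem.Dict.mk individual_ids).get? v.1).getD "" ++ "|" ++ ((PySem.Dict.mk label_map).get? v.1).getD v.1 ++ "]]"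
            else if (PySem.Dict.mk prop_ids).contains v.1 then
              "[[" ++ ((PySem.Dict.mk prop_ids).get? v.1).getD "" ++ "|" ++ ((PySem.Dict.mk label_map).get? v.1).getD v.1 ++ "]]"
            else pvDisplay v.1 label_map prefixes
          else v.1)))
      = (fun (a : String × List (String × Bool)) =>
        a.2.map (fun v => "- " ++ pvDisplay a.1 label_map prefixes ++ ": " ++
          pvValA prop_ids class_ids enum_ids datatype_ids individual_ids label_map prefixes v.1 v.2))
      from rfl]
  rw [hflat]
  by_cases he : pvTriples annotations = []
  · simp [he]
  · have h1 : ((pvTriples annotations).map (pvLineA prop_ids class_ids enum_ids datatype_ids individual_ids label_map prefixes)).isEmpty = false := by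
      simp [he]
    have h2 : (pvTriples annotations).isEmpty = false := by simp [he]
    rw [h1, h2]
    simp

-- B's pipeline, closed form
theorem B_closed (annotations : List (String × List (String × Bool))) (prop_ids class_ids enum_ids datatype_ids individual_ids label_map prefixes : List (String × String)) :
    annotation_lines_py_alt annotations prop_ids class_ids enum_ids datatype_ids individual_ids label_map prefixes
      = (if (pvTriples annotations).isEmpty then ["- None"]
         else (pvTriples annotations).map (pvLineB prop_ids class_ids enum_ids datatype_ids individual_ids label_map prefixes (pvCacheOf label_map prefixes (pvTriples annotations)))) := by
  unfold annotation_lines_py_alt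
  simp only [PySem.List.foldl_append_singleton_eq_map, List.nil_append]
  rfl

-- ===== VERDICT =====
theorem annotation_lines_py_spec : Claim_equal_annotation_lines_py := by
  intro annotations prop_ids class_ids enum_ids datatype_ids individual_ids label_map prefixes _
  unfold Spec_annotation_lines_py
  rw [A_closed, B_closed]
  by_cases he : (pvTriples annotations).isEmpty
  · rw [if_pos he, if_pos he]
  · rw [if_neg he, if_neg he]
    exact (List.map_congr_left (fun t ht =>
      (lineB_eq prop_ids class_ids enum_ids datatype_ids individual_ids label_map prefixes
        (pvTriples annotations) t ht))).symm
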